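-- pv_equiv track=rewrite | github.com/kanika1-13/practice-questions | exclusion.py | process_for_K
-- ===== SOURCE A (Python) =====
-- def process_for_K(arr, K):
--     bucket = []
--     score = 0
--
--     for i in range(K - 1):
--         bucket.append(arr[i])
--
--     for i in range(K - 1, len(arr)):
--         bucket.append(arr[i])
--         bucket.sort()
--         picked = bucket.pop()
--         score += picked
--
--     return score
-- ===== SOURCE B (Python) =====
-- def process_for_K(arr, K):
--     # Keep the bucket sorted once and for all: seed it sorted, then per element either
--     # credit the element directly when it is the current maximum, or pop the max and
--     # insert the element at its sorted place. Same index ranges as the task states.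
--     bucket = sorted(arr[i] for i in range(K - 1))
--     score = 0
--     for i in range(K - 1, len(arr)):
--         x = arr[i]
--         if bucket and x < bucket[-1]:
--             score += bucket.pop()
--             j = 0
--             while j < len(bucket) and bucket[j] <= x:
--                 j += 1
--             bucket.insert(j, x)
--         else:
--             score += x
--     return score
-- ===== Notes on version B (the rewrite author's own statement) =====
-- stated objective: alternative
-- what changed: Instead of appending, re-sorting the whole bucket and popping on every step, B keeps the bucket sorted permanently: it sorts the seed once, then per element either credits the element itself when it is the current maximum (bucket untouched), or pops the sorted bucket's last element and inserts the new one at its ordered position.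
import Mathlib
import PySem

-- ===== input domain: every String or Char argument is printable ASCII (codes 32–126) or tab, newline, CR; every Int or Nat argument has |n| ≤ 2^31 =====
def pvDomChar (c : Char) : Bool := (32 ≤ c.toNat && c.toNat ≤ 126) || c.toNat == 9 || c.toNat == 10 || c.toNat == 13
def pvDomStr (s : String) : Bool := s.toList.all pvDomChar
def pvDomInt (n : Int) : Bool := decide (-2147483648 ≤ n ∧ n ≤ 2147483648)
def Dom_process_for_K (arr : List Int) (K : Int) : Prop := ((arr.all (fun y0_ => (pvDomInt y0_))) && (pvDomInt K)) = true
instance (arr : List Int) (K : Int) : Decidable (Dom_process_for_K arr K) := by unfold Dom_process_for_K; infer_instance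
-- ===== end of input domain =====

-- B keeps the bucket sorted throughout (sort the seed once, then per element either credit it
-- directly when it is the current maximum, or pop the max and ordered-insert the element) instead
-- of A's append-resort-pop per step; alternative maintenance strategy, proved equal for K >= 1.


-- ===== PORT A =====
-- loop body of A's second loop on the fetched element v:
-- bucket.append(v); bucket.sort(); picked = bucket.pop(); score += picked
def stepA (st : List Int × Int) (v : Int) : List Int × Int :=
  let b := PySem.List.sorted (st.1 ++ [v]) (fun x => x) false
  (b.dropLast, st.2 + (PySem.List.pyGet? b (-1)).getD 0)

def process_for_K (arr : List Int) (K : Int) : Int :=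
  -- for i in range(K-1): bucket.append(arr[i])
  let bucket : List Int :=
    (PySem.List.pyRange 0 (K - 1) 1).foldl (fun b i => b ++ [PySem.List.pyGetD arr i 0]) []
  -- for i in range(K-1, len(arr)): …
  let r :=
    (PySem.List.pyRange (K - 1) (arr.length : Int) 1).foldl
      (fun st i => stepA st (PySem.List.pyGetD arr i 0)) (bucket, 0)
  r.2

-- ===== PORT B =====
-- the `while i < len(bucket) and bucket[i] <= x` scan: number of leading elements ≤ x
def insPos : List Int → Int → Nat
  | [], _ => 0
  | h :: t, x => if h ≤ x then insPos t x + 1 else 0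

-- loop body of B: if bucket and x < bucket[-1]: score += bucket.pop(); linear scan; bucket.insert(i, x)
-- (i = insPos ≤ len(bucket), so list.insert is exactly List.insertIdx) else: score += x
def stepB (st : List Int × Int) (x : Int) : List Int × Int :=
  if st.1 ≠ [] ∧ x < (PySem.List.pyGet? st.1 (-1)).getD 0 then
    let b' := st.1.dropLast
    (b'.insertIdx (insPos b' x) x, st.2 + (PySem.List.pyGet? st.1 (-1)).getD 0)
  else (st.1, st.2 + x)

def process_for_K_alt (arr : List Int) (K : Int) : Int :=
  -- bucket = sorted(arr[i] for i in range(K-1))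
  let bucket := PySem.List.sorted
    ((PySem.List.pyRange 0 (K - 1) 1).map (fun i => PySem.List.pyGetD arr i 0)) (fun x => x) false
  -- for i in range(K-1, len(arr)): x = arr[i]; …
  let r := (PySem.List.pyRange (K - 1) (arr.length : Int) 1).foldl
    (fun st i => stepB st (PySem.List.pyGetD arr i 0)) (bucket, 0)
  r.2

-- ===== PRECONDITION & SPEC =====
-- Exactly the inputs on which A returns: every index it reads is in range (for K ≤ 0 Python's
-- negative indices reach back into arr, which needs K ≥ 1 - len(arr)); elsewhere A raises IndexError.
def Pre_process_for_K (arr : List Int) (K : Int) : Prop :=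
  (1 ≤ K ∧ K ≤ arr.length + 1) ∨ (1 - arr.length ≤ K ∧ K ≤ 0)
instance (arr : List Int) (K : Int) : Decidable (Pre_process_for_K arr K) := by
  unfold Pre_process_for_K; infer_instance
def pvWitness_process_for_K : List Int × Int := ([3, 1, 4, 1, 5], 3)

def Spec_process_for_K (arr : List Int) (K : Int) (out : Int) : Prop := out = process_for_K_alt arr K
instance (arr : List Int) (K : Int) (out : Int) : Decidable (Spec_process_for_K arr K out) := by
  unfold Spec_process_for_K; infer_instance

-- ===== CLAIM (what is proved, stated in full; the proofs are below) =====
def Claim_equal_process_for_K : Prop := ∀ (arr : List Int) (K : Int), Dom_process_for_K arr K → Pre_process_for_K arr K → Spec_process_for_K arr K (process_for_K arr K)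

-- ===== LEMMAS AND PROOFS =====

theorem lastD_concat (ys : List Int) (m : Int) :
    (PySem.List.pyGet? (ys ++ [m]) (-1)).getD 0 = m := by
  simp [PySem.List.pyGet?, PySem.List.pyIdx?]

theorem insertIdx_insPos_cons (h x : Int) (t : List Int) :
    (h :: t).insertIdx (insPos (h :: t) x) x =
      if h ≤ x then h :: t.insertIdx (insPos t x) x else x :: h :: t := by
  by_cases hx : h ≤ x <;> simp [insPos, hx, List.insertIdx]

theorem perm_insertIdx_insPos (b : List Int) (x : Int) :
    (b.insertIdx (insPos b x) x).Perm (x :: b) := by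
  induction b with
  | nil => simp [insPos]
  | cons h t ih =>
      rw [insertIdx_insPos_cons]
      by_cases hx : h ≤ x
      · rw [if_pos hx]
        exact (ih.cons h).trans (List.Perm.swap x h t)
      · rw [if_neg hx]

theorem mem_insertIdx_insPos {y : Int} {b : List Int} {x : Int}
    (hy : y ∈ b.insertIdx (insPos b x) x) : y = x ∨ y ∈ b := by
  have := (perm_insertIdx_insPos b x).mem_iff.mp hy
  simpa using this

theorem pairwise_insertIdx_insPos (b : List Int) (x : Int)
    (hb : b.Pairwise (· ≤ ·)) : (b.insertIdx (insPos b x) x).Pairwise (· ≤ ·) := by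
  induction b with
  | nil => simp [insPos]
  | cons h t ih =>
      rcases List.pairwise_cons.mp hb with ⟨hh, ht⟩
      rw [insertIdx_insPos_cons]
      by_cases hx : h ≤ x
      · rw [if_pos hx]
        refine List.pairwise_cons.mpr ⟨?_, ih ht⟩
        intro y hy
        rcases mem_insertIdx_insPos hy with rfl | hy'
        · exact hx
        · exact hh y hy'
      · rw [if_neg hx]
        have hx' : x ≤ h := le_of_lt (lt_of_not_ge hx)
        refine List.pairwise_cons.mpr ⟨?_, hb⟩
        intro y hy
        rcases List.mem_cons.mp hy with rfl | hy'
        · exact hx'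
        · exact hx'.trans (hh y hy')

-- every element of ys is ≤ m when ys ++ [m] is nondecreasing
theorem le_last_of_pairwise {ys : List Int} {m : Int}
    (h : (ys ++ [m]).Pairwise (· ≤ ·)) : ∀ y ∈ ys, y ≤ m := by
  intro y hy
  exact (List.pairwise_append.mp h).2.2 y hy m (by simp)

-- the heart: one step of B on a sorted bucket equals one step of A on any permutation of it
theorem step_eq (b sb : List Int) (s : Int) (x : Int)
    (hperm : sb.Perm b) (hsort : sb.Pairwise (· ≤ ·)) :
    stepB (sb, s) x = stepA (b, s) x := by
  rcases List.eq_nil_or_concat sb with rfl | ⟨ys, m, rfl⟩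
  · -- empty bucket: A sorts [x] and pops it; B credits x
    have hb : b = [] := hperm.symm.eq_nil
    subst hb
    have hS : PySem.List.sorted (([] : List Int) ++ [x]) (fun x => x) false = [] ++ [x] :=
      PySem.List.sorted_id_eq_of_perm_of_pairwise _ _ (by simp) (by simp)
    have h1 : PySem.List.sorted [x] (fun x => x) false = [x] := by simpa using hS
    unfold stepA stepB
    simp [h1, PySem.List.pyGet?, PySem.List.pyIdx?]
  · rw [List.concat_eq_append] at hperm hsort ⊢
    have hys : ∀ y ∈ ys, y ≤ m := le_last_of_pairwise hsort
    by_cases hx : x < m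
    · -- x below the max: sorted(bucket + [x]) = (ordered-insert x ys) ++ [m]
      have hS : PySem.List.sorted (b ++ [x]) (fun x => x) false
          = ys.insertIdx (insPos ys x) x ++ [m] := by
        apply PySem.List.sorted_id_eq_of_perm_of_pairwise
        · have p1 : (ys.insertIdx (insPos ys x) x ++ [m]).Perm ((x :: ys) ++ [m]) :=
            (perm_insertIdx_insPos ys x).append_right [m]
          have p2 : ((x :: ys) ++ [m]).Perm (b ++ [x]) :=
            (hperm.cons x).trans (List.perm_append_comm (l₁ := [x]) (l₂ := b))
          exact p1.trans p2
        · have hpart : (ys.insertIdx (insPos ys x) x).Pairwise (· ≤ ·) :=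
            pairwise_insertIdx_insPos ys x (List.pairwise_append.mp hsort).1
          refine List.pairwise_append.mpr ⟨hpart, by simp, ?_⟩
          intro y hy m' hm'
          rcases List.mem_singleton.mp hm' with rfl
          rcases mem_insertIdx_insPos hy with rfl | hy'
          · exact le_of_lt hx
          · exact hys y hy'
      have hcond : (ys ++ [m] ≠ [] ∧ x < (PySem.List.pyGet? (ys ++ [m]) (-1)).getD 0) := by
        refine ⟨by simp, ?_⟩
        rw [lastD_concat]; exact hx
      unfold stepA stepB
      rw [if_pos hcond, hS]
      simp
    · -- x is the (weak) max: sorted(bucket + [x]) = sorted-bucket ++ [x]; both pop x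
      have hx' : m ≤ x := le_of_not_gt hx
      have hS : PySem.List.sorted (b ++ [x]) (fun x => x) false = (ys ++ [m]) ++ [x] := by
        apply PySem.List.sorted_id_eq_of_perm_of_pairwise
        · exact hperm.append_right [x]
        · refine List.pairwise_append.mpr ⟨hsort, by simp, ?_⟩
          intro y hy x' hx''
          rcases List.mem_singleton.mp hx'' with rfl
          rcases List.mem_append.mp hy with hy' | hy'
          · exact (hys y hy').trans hx'
          · rcases List.mem_singleton.mp hy' with rfl; exact hx'
      have hcond : ¬ (ys ++ [m] ≠ [] ∧ x < (PySem.List.pyGet? (ys ++ [m]) (-1)).getD 0) := by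
        rw [lastD_concat]; simp; omega
      unfold stepA stepB
      rw [if_neg hcond, hS]
      simp
      rw [show ys ++ [m, x] = (ys ++ [m]) ++ [x] by simp, lastD_concat]

theorem stepA_fst_pairwise (b : List Int) (s : Int) (v : Int) :
    (stepA (b, s) v).1.Pairwise (· ≤ ·) := by
  have : (PySem.List.sorted (b ++ [v]) (fun x => x) false).Pairwise (· ≤ ·) := by
    simpa using PySem.List.sorted_pairwise (b ++ [v]) (fun x => x)
  exact this.sublist (List.dropLast_sublist _)

theorem fold_eq (l : List Int) : ∀ (b sb : List Int) (s : Int),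
    sb.Perm b → sb.Pairwise (· ≤ ·) →
    (l.foldl stepB (sb, s)).2 = (l.foldl stepA (b, s)).2 := by
  induction l with
  | nil => intro b sb s _ _; rfl
  | cons x l ih =>
      intro b sb s hperm hsort
      simp only [List.foldl_cons]
      rw [step_eq b sb s x hperm hsort]
      exact ih (stepA (b, s) x).1 (stepA (b, s) x).1 (stepA (b, s) x).2
        (List.Perm.refl _) (stepA_fst_pairwise b s x)

-- ===== VERDICT (by name: the statement is the Claim_ definition above) =====
theorem process_for_K_spec : Claim_equal_process_for_K := by
  intro arr K _ _
  unfold Spec_process_for_K process_for_K process_for_K_alt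
  simp only []
  rw [PySem.List.foldl_append_singleton_eq_map (fun i => PySem.List.pyGetD arr i 0)
      (PySem.List.pyRange 0 (K - 1) 1) [], List.nil_append,
    ← List.foldl_map (f := fun i => PySem.List.pyGetD arr i 0) (g := stepA),
    ← List.foldl_map (f := fun i => PySem.List.pyGetD arr i 0) (g := stepB)]
  exact (fold_eq _ _ _ 0 (PySem.List.sorted_perm _ _ false)
    (by simpa using PySem.List.sorted_pairwise _ (fun x => x))).symm
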